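-- pv_equiv track=rewrite | github.com/mufans/AppSmartInspector | tests/test_high_priority_fixes.py | _normalize_and_accumulate
-- ===== SOURCE A (Python) =====
-- def _normalize_and_accumulate(raw_states: list[tuple[str, int]]) -> dict:
--     """Simulate the normalization + accumulation logic from perfetto.py."""
--     state_dist = {}
--     for state, ns in raw_states:
--         if state in ("R", "R+"):
--             state = "Running"
--         elif state in ("S", "S+"):
--             state = "Sleeping"
--         elif state in ("D", "D+"):
--             state = "DiskSleep"
--         state_dist[state] = state_dist.get(state, 0) + ns
--     return state_dist
-- ===== SOURCE B (Python) =====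
-- _TABLE = {"R": "Running", "R+": "Running",
--           "S": "Sleeping", "S+": "Sleeping",
--           "D": "DiskSleep", "D+": "DiskSleep"}
--
--
-- def _normalize_and_accumulate(raw_states: list[tuple[str, int]]) -> dict:
--     pairs = [(_TABLE.get(state, state), ns) for state, ns in raw_states]
--     keys = dict.fromkeys(label for label, _ in pairs)
--     return {k: sum(ns for label, ns in pairs if label == k) for k in keys}
-- ===== Notes on version B (the rewrite author's own statement) =====
-- stated objective: alternative
-- what changed: Replaces the incremental get-and-add dict accumulator with a two-pass group-by: normalize every label via a lookup table, dedup the labels in first-occurrence order, and build each entry as a filtered sum over the normalized pairs.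
import Mathlib
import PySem

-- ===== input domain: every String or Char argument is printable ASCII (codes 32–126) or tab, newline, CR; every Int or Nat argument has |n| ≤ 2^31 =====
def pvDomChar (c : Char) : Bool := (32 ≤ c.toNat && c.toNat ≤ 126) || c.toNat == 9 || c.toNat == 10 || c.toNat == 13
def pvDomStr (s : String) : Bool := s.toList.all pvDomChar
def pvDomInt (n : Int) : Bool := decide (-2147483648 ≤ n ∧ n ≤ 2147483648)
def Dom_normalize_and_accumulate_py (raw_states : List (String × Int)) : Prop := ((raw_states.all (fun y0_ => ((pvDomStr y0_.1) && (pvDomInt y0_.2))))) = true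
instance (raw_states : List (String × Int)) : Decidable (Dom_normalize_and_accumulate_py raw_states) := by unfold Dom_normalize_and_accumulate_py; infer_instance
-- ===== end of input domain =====

-- B replaces A's incremental get-and-add dict accumulation with a two-pass group-by
-- (normalize, dedup labels in first-occurrence order, filtered sum per label); alternative decomposition, no speed claim.


-- ===== PORT A =====
-- the if-elif-elif normalization of the loop body
def pvNormA (s : String) : String :=
  if s = "R" ∨ s = "R+" then "Running"
  else if s = "S" ∨ s = "S+" then "Sleeping"
  else if s = "D" ∨ s = "D+" then "DiskSleep"
  else s

def normalize_and_accumulate_py (raw_states : List (String × Int)) : List (String × Int) :=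
  (raw_states.foldl
    (fun (d : PySem.Dict String Int) p =>
      let state := pvNormA p.1
      d.insert state (d.getD state 0 + p.2))
    PySem.Dict.empty).items

-- ===== PORT B =====
def pvTableB : PySem.Dict String String :=
  PySem.Dict.ofList [("R", "Running"), ("R+", "Running"),
                     ("S", "Sleeping"), ("S+", "Sleeping"),
                     ("D", "DiskSleep"), ("D+", "DiskSleep")]

def normalize_and_accumulate_py_alt (raw_states : List (String × Int)) : List (String × Int) :=
  let pairs := raw_states.map (fun p => (pvTableB.getD p.1 p.1, p.2))
  let keys := PySem.List.dedup (pairs.map (fun q => q.1))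
  keys.map (fun k => (k, ((pairs.filter (fun q => q.1 == k)).map (fun q => q.2)).sum))

-- ===== PRECONDITION & SPEC =====
def Spec_normalize_and_accumulate_py (raw_states : List (String × Int)) (out : List (String × Int)) : Prop := out = normalize_and_accumulate_py_alt raw_states
instance (raw_states : List (String × Int)) (out : List (String × Int)) : Decidable (Spec_normalize_and_accumulate_py raw_states out) := by unfold Spec_normalize_and_accumulate_py; infer_instance

-- ===== CLAIM (what is proved, stated in full; the proofs are below) =====
def Claim_equal_normalize_and_accumulate_py : Prop := ∀ (raw_states : List (String × Int)), Dom_normalize_and_accumulate_py raw_states → Spec_normalize_and_accumulate_py raw_states (normalize_and_accumulate_py raw_states)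

-- ===== LEMMAS AND PROOFS =====

-- B's table lookup computes exactly A's if-elif normalization
theorem pvNorm_eq (s : String) : pvTableB.getD s s = pvNormA s := by
  unfold pvTableB pvNormA
  simp only [PySem.Dict.ofList, PySem.Dict.update, List.foldl,
    PySem.Dict.getD_eq_get?_getD, PySem.Dict.get?_insert, PySem.Dict.get?_empty]
  by_cases h1 : s = "R" <;> by_cases h2 : s = "R+" <;> by_cases h3 : s = "S" <;>
    by_cases h4 : s = "S+" <;> by_cases h5 : s = "D" <;> by_cases h6 : s = "D+" <;>
    simp_all

-- value accumulated by A's loop at key k = sum of matching ns, from any start dict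
theorem pvGetD_fold (l : List (String × Int)) (d : PySem.Dict String Int) (k : String) :
    (l.foldl (fun (d : PySem.Dict String Int) p =>
        d.insert (pvNormA p.1) (d.getD (pvNormA p.1) 0 + p.2)) d).getD k 0
      = d.getD k 0 + ((l.filter (fun p => pvNormA p.1 == k)).map (fun p => p.2)).sum := by
  induction l generalizing d with
  | nil => simp
  | cons p t ih =>
    simp only [List.foldl_cons, ih, List.filter_cons]
    by_cases h : pvNormA p.1 = k
    · simp [h]
      ring
    · simp [h, PySem.Dict.getD_insert, Ne.symm h]

theorem normalize_and_accumulate_py_eq (raw_states : List (String × Int)) :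
    normalize_and_accumulate_py raw_states = normalize_and_accumulate_py_alt raw_states := by
  unfold normalize_and_accumulate_py normalize_and_accumulate_py_alt
  have hnd : (raw_states.foldl
      (fun (d : PySem.Dict String Int) p =>
        d.insert (pvNormA p.1) (d.getD (pvNormA p.1) 0 + p.2))
      PySem.Dict.empty).keys.Nodup :=
    PySem.Dict.nodup_keys_foldl_insert_key raw_states (fun p => pvNormA p.1) _ _
      PySem.Dict.nodup_keys_empty
  rw [PySem.Dict.items_eq_map_keys _ hnd 0,
      PySem.Dict.keys_foldl_insert_key]
  simp only [PySem.Dict.keys_empty, PySem.Set.update_nil_left, pvNorm_eq,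
    PySem.List.dedup_eq_ofList, List.map_map, Function.comp_def, List.filter_map,
    pvGetD_fold]
  apply List.map_congr_left
  intro k _
  simp [PySem.Dict.getD_empty]

-- ===== VERDICT (by name: the statement is the Claim_ definition above) =====
theorem normalize_and_accumulate_py_spec : Claim_equal_normalize_and_accumulate_py := by
  intro raw_states _
  unfold Spec_normalize_and_accumulate_py
  exact normalize_and_accumulate_py_eq raw_states
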